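-- pv_equiv track=rewrite | github.com/rsmith-nl/scripts | mkhistory.py | genrecords
-- ===== SOURCE A (Python) =====
-- commithdr = r'wijziging:'
--
-- authorhdr = r'door:'
--
-- datehdr = r'datum:'
--
-- begintable = r"""\begingroup\hspace{-\tabcolsep}
-- \begin{tabular}{p{0.1\textwidth}p{0.8\textwidth}}
-- """
--
-- endtable = r"""\end{tabular}\endgroup
--
-- """
--
-- def genrecords(lol):
--     """Generate a LaTeX table for each commit in the input lines..
--
--     Keyword arguments:
--     lol -- list of lines
--     """
--     rv = ''
--     for ln in lol:
--         if ln.startswith('commit'):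
--             if rv:
--                 rv += endtable
--                 yield rv
--             rv = begintable
--             words = ln.split(' ', 1)
--             ln = ln.replace(' ', ' & ', 1)
--             rv += '  ' + commithdr + ' & ' + words[1] + '\\\\\n'
--         elif ln.startswith('Merge:'):
--             words = ln.split(':', 1)
--             rv += '  ' + commithdr + ': & ' + words[1].lstrip(None) + '\\\\\n'
--         elif ln.startswith('Author:'):
--             ln = ln.replace(': ', ': & ')
--             ln = ln.replace('Author:', authorhdr)
--             rv += '  ' + ln + '\\\\\n'
--         elif ln.startswith('Date:'):
--             ln = ln.replace(': ', ': & ')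
--             ln = ln.replace('Date:', datehdr)
--             rv += '  ' + ln + '\\\\\n'
--         else:
--             ln = ln.lstrip(None)
--             if len(ln):
--                 rv += '  & ' + ln + '\\\\\n'
--     if rv:
--         rv += endtable + '% EOF\n'
--         yield rv
--     return
-- ===== SOURCE B (Python) =====
-- commithdr = r'wijziging:'
--
-- authorhdr = r'door:'
--
-- datehdr = r'datum:'
--
-- begintable = r"""\begingroup\hspace{-\tabcolsep}
-- \begin{tabular}{p{0.1\textwidth}p{0.8\textwidth}}
-- """
--
-- endtable = r"""\end{tabular}\endgroup
--
-- """
--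
--
-- def _fmtline(ln):
--     """Format one non-'commit' line as a table row ('' for blank lines)."""
--     if ln.startswith('Merge:'):
--         return '  ' + commithdr + ': & ' + ln.split(':', 1)[1].lstrip() + '\\\\\n'
--     if ln.startswith('Author:'):
--         return '  ' + ln.replace(': ', ': & ').replace('Author:', authorhdr) + '\\\\\n'
--     if ln.startswith('Date:'):
--         return '  ' + ln.replace(': ', ': & ').replace('Date:', datehdr) + '\\\\\n'
--     stripped = ln.lstrip()
--     if stripped:
--         return '  & ' + stripped + '\\\\\n'
--     return ''
--
--
-- def _blockbody(blk):
--     """The table body of one block of lines (begintable only for 'commit' blocks)."""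
--     if blk and blk[0].startswith('commit'):
--         rows = [begintable + '  ' + commithdr + ' & ' + blk[0].split(' ', 1)[1] + '\\\\\n']
--         rows.extend(_fmtline(ln) for ln in blk[1:])
--     else:
--         rows = [_fmtline(ln) for ln in blk]
--     return ''.join(rows)
--
--
-- def genrecords(lol):
--     """Generate a LaTeX table for each commit in the input lines.
--
--     Keyword arguments:
--     lol -- list of lines
--     """
--     # Partition the lines into a leading block plus one block per 'commit' line.
--     blocks, cur = [], []
--     for ln in lol:
--         if ln.startswith('commit'):
--             blocks.append(cur)
--             cur = [ln]
--         else: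
--             cur.append(ln)
--     blocks.append(cur)
--     bodies = [b for b in (_blockbody(blk) for blk in blocks) if b]
--     res = [b + endtable for b in bodies]
--     if res:
--         res[-1] += '% EOF\n'
--     yield from res
-- ===== Notes on version B (the rewrite author's own statement) =====
-- stated objective: alternative
-- what changed: Replaces A's single pass that interleaves string accumulation with yielding by a three-stage pipeline: partition the lines into blocks at 'commit' lines, render each block's body with a per-line formatter joined at the end, then append endtable to every nonempty body and '% EOF' to the last.
import Mathlib
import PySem

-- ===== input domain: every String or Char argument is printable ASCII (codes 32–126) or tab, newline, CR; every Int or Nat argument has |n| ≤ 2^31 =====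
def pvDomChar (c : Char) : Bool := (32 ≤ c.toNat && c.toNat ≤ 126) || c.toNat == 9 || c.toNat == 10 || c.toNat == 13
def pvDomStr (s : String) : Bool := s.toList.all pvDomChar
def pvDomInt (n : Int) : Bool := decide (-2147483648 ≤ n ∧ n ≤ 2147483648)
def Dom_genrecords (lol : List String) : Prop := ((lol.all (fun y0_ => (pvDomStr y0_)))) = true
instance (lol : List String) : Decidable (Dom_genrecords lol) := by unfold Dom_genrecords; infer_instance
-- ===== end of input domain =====

-- B re-groups the lines into blocks first and formats each block separately (a different
-- decomposition of the same job, 'alternative'); A and B are generators — the List String is the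
-- sequence of yielded strings.

-- module constants (shared by both Pythons)
def commithdr : String := "wijziging:"
def authorhdr : String := "door:"
def datehdr : String := "datum:"
def begintable : String := "\\begingroup\\hspace{-\\tabcolsep}\n\\begin{tabular}{p{0.1\\textwidth}p{0.8\\textwidth}}\n"
def endtable : String := "\\end{tabular}\\endgroup\n\n"

-- ===== PORT A =====
-- one iteration of A's loop over the lines; state = (rv, list of strings yielded so far)
def genrecordsStep (st : String × List String) (ln : String) : String × List String :=
  let rv := st.1
  let out := st.2
  if PySem.Str.startswith ln "commit" then
    let out := if rv ≠ "" then out ++ [rv ++ endtable] else out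
    let words := (PySem.Str.splitMax? ln " " 1).getD []   -- sep ≠ "", never none
    -- Python's dead `ln = ln.replace(' ', ' & ', 1)` dropped (its result is never used)
    -- words[1]: IndexError (none) when ln has no space — excluded by Pre_genrecords
    (begintable ++ "  " ++ commithdr ++ " & " ++ (PySem.List.pyGet? words 1).getD "" ++ "\\\\\n", out)
  else if PySem.Str.startswith ln "Merge:" then
    let words := (PySem.Str.splitMax? ln ":" 1).getD []   -- ln contains ':', so words[1] exists
    (rv ++ ("  " ++ commithdr ++ ": & " ++ PySem.Str.lstrip ((PySem.List.pyGet? words 1).getD "") ++ "\\\\\n"), out)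
  else if PySem.Str.startswith ln "Author:" then
    let ln := PySem.Str.replace ln ": " ": & "
    let ln := PySem.Str.replace ln "Author:" authorhdr
    (rv ++ ("  " ++ ln ++ "\\\\\n"), out)
  else if PySem.Str.startswith ln "Date:" then
    let ln := PySem.Str.replace ln ": " ": & "
    let ln := PySem.Str.replace ln "Date:" datehdr
    (rv ++ ("  " ++ ln ++ "\\\\\n"), out)
  else
    let ln := PySem.Str.lstrip ln
    if PySem.Str.len ln ≠ 0 then (rv ++ ("  & " ++ ln ++ "\\\\\n"), out) else (rv, out)

def genrecords (lol : List String) : List String :=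
  let fin := lol.foldl genrecordsStep ("", [])
  if fin.1 ≠ "" then fin.2 ++ [fin.1 ++ (endtable ++ "% EOF\n")] else fin.2

-- ===== PORT B =====
-- format one non-'commit' line as a table row ('' for blank lines)
def fmtline (ln : String) : String :=
  if PySem.Str.startswith ln "Merge:" then
    "  " ++ commithdr ++ ": & " ++ PySem.Str.lstrip ((PySem.List.pyGet? ((PySem.Str.splitMax? ln ":" 1).getD []) 1).getD "") ++ "\\\\\n"
  else if PySem.Str.startswith ln "Author:" then
    "  " ++ PySem.Str.replace (PySem.Str.replace ln ": " ": & ") "Author:" authorhdr ++ "\\\\\n"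
  else if PySem.Str.startswith ln "Date:" then
    "  " ++ PySem.Str.replace (PySem.Str.replace ln ": " ": & ") "Date:" datehdr ++ "\\\\\n"
  else
    let stripped := PySem.Str.lstrip ln
    if PySem.Str.len stripped ≠ 0 then "  & " ++ stripped ++ "\\\\\n" else ""

-- the table body of one block of lines (begintable only for 'commit' blocks)
def blockbody (blk : List String) : String :=
  match blk with
  | [] => PySem.Str.join "" ([].map fmtline)
  | b0 :: rest =>
    if PySem.Str.startswith b0 "commit" then
      PySem.Str.join "" ((begintable ++ "  " ++ commithdr ++ " & " ++ (PySem.List.pyGet? ((PySem.Str.splitMax? b0 " " 1).getD []) 1).getD "" ++ "\\\\\n") :: rest.map fmtline)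
    else
      PySem.Str.join "" ((b0 :: rest).map fmtline)

-- one iteration of B's partition loop; state = (blocks so far, current block)
def altSplitStep (st : List (List String) × List String) (ln : String) : List (List String) × List String :=
  if PySem.Str.startswith ln "commit" then (st.1 ++ [st.2], [ln]) else (st.1, st.2 ++ [ln])

def genrecords_alt (lol : List String) : List String :=
  let st := lol.foldl altSplitStep ([], [])
  let blocks := st.1 ++ [st.2]
  let bodies := (blocks.map blockbody).filter (fun b => b ≠ "")
  let res := bodies.map (fun b => b ++ endtable)
  if res = [] then [] else res.dropLast ++ [res.getLast?.getD "" ++ "% EOF\n"]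

-- ===== PRECONDITION & SPEC =====
-- Pre_ excludes lines that start with 'commit' but contain no space: there Python A's
-- `ln.split(' ', 1)[1]` raises IndexError (B raises the same way).
def Pre_genrecords (lol : List String) : Prop :=
  ∀ ln ∈ lol, PySem.Str.startswith ln "commit" = true → PySem.Str.isIn " " ln = true
instance (lol : List String) : Decidable (Pre_genrecords lol) := by unfold Pre_genrecords; infer_instance

def pvWitness_genrecords : List String :=
  ["commit 1a2b3c", "Author: R.F. Smith <rs@rsmith.home>", "Date: Sun May 1", "", "    update scripts", "commit 4d5e6f", "Merge: 1a2b 4d5e"]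

def Spec_genrecords (lol : List String) (out : List String) : Prop := out = genrecords_alt lol
instance (lol : List String) (out : List String) : Decidable (Spec_genrecords lol out) := by unfold Spec_genrecords; infer_instance

-- ===== CLAIM (what is proved, stated in full; the proofs are below) =====
def Claim_equal_genrecords : Prop := ∀ (lol : List String), Dom_genrecords lol → Pre_genrecords lol → Spec_genrecords lol (genrecords lol)

-- ===== LEMMAS AND PROOFS =====

-- the body row A/B build for a 'commit' line
def commitRow (ln : String) : String :=
  begintable ++ "  " ++ commithdr ++ " & " ++ (PySem.List.pyGet? ((PySem.Str.splitMax? ln " " 1).getD []) 1).getD "" ++ "\\\\\n"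

-- the sequence of nonempty table bodies generated from the lines, starting from partial body rv
def bodies (rv : String) : List String → List String
  | [] => if rv = "" then [] else [rv]
  | ln :: rest =>
    if PySem.Str.startswith ln "commit" then
      (if rv = "" then [] else [rv]) ++ bodies (commitRow ln) rest
    else bodies (rv ++ fmtline ln) rest

-- append endtable to every body, and '% EOF\n' to the last
def emit : List String → List String
  | [] => []
  | [b] => [b ++ (endtable ++ "% EOF\n")]
  | b :: rest => (b ++ endtable) :: emit rest

-- recursive form of B's partition loop
def splitRec (cur : List String) : List String → List (List String)
  | [] => [cur]
  | ln :: rest =>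
    if PySem.Str.startswith ln "commit" then cur :: splitRec [ln] rest
    else splitRec (cur ++ [ln]) rest

theorem str_append_ne_empty (s t : String) (h : s ≠ "") : s ++ t ≠ "" := by
  intro he
  apply h
  have h2 : (s ++ t).toList = [] := by rw [he]; rfl
  rw [String.toList_append, List.append_eq_nil_iff] at h2
  calc s = String.ofList s.toList := String.ofList_toList.symm
    _ = "" := by rw [h2.1]

theorem commitRow_ne_empty (ln : String) : commitRow ln ≠ "" := by
  unfold commitRow
  apply str_append_ne_empty
  apply str_append_ne_empty
  decide

theorem bodies_ne_nil (l : List String) : ∀ rv, rv ≠ "" → bodies rv l ≠ [] := by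
  induction l with
  | nil => intro rv h; simp only [bodies]; rw [if_neg h]; simp
  | cons ln rest ih =>
    intro rv h
    by_cases hc : PySem.Str.startswith ln "commit" = true
    · simp only [bodies]; rw [if_pos hc, if_neg h]; simp
    · simp only [bodies]; rw [if_neg hc]
      exact ih _ (str_append_ne_empty _ _ h)

theorem emit_cons (b : String) (bs : List String) (h : bs ≠ []) :
    emit (b :: bs) = (b ++ endtable) :: emit bs := by
  cases bs with
  | nil => exact absurd rfl h
  | cons c t => rfl

-- A's loop step for a non-'commit' line just appends fmtline ln to rv
theorem stepA_noncommit (rv : String) (out : List String) (ln : String)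
    (h : PySem.Str.startswith ln "commit" = false) :
    genrecordsStep (rv, out) ln = (rv ++ fmtline ln, out) := by
  have h' : ¬ (PySem.Str.startswith ln "commit" = true) := by rw [h]; decide
  simp only [genrecordsStep, fmtline]
  rw [if_neg h']
  split_ifs <;> simp [String.append_assoc]

-- A's loop + final flush, from any state, produces out ++ emit (bodies rv lol)
theorem loopA_eq (lol : List String) : ∀ (rv : String) (out : List String),
    (let fin := lol.foldl genrecordsStep (rv, out)
     if fin.1 ≠ "" then fin.2 ++ [fin.1 ++ (endtable ++ "% EOF\n")] else fin.2)
      = out ++ emit (bodies rv lol) := by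
  induction lol with
  | nil =>
    intro rv out
    by_cases h : rv = "" <;> simp [bodies, emit, h]
  | cons ln rest ih =>
    intro rv out
    by_cases hc : PySem.Str.startswith ln "commit" = true
    · have hstep : genrecordsStep (rv, out) ln =
          (commitRow ln, if rv ≠ "" then out ++ [rv ++ endtable] else out) := by
        simp only [genrecordsStep, commitRow]
        rw [if_pos hc]
      simp only [List.foldl_cons, hstep]
      rw [ih]
      simp only [bodies]
      rw [if_pos hc]
      by_cases h : rv = ""
      · rw [if_pos h, if_neg (by simp [h] : ¬ rv ≠ "")]
        simp
      · rw [if_neg h, if_pos h, List.singleton_append,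
          emit_cons _ _ (bodies_ne_nil _ _ (commitRow_ne_empty ln))]
        simp
    · simp only [List.foldl_cons, stepA_noncommit rv out ln (by simpa using hc)]
      rw [ih]
      simp only [bodies]
      rw [if_neg hc]

-- empty-separator join lemmas for B's ''.join(rows)
theorem charsJoinE_cons (a : List Char) (l : List (List Char)) :
    PySem.Chars.join [] (a :: l) = a ++ PySem.Chars.join [] l := by
  cases l <;> simp [PySem.Chars.join, List.intercalate]

theorem strJoinE_cons (a : String) (l : List String) :
    PySem.Str.join "" (a :: l) = a ++ PySem.Str.join "" l := by
  show String.ofList (PySem.Chars.join [] ((a :: l).map String.toList)) =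
    a ++ String.ofList (PySem.Chars.join [] (l.map String.toList))
  rw [List.map_cons, charsJoinE_cons, String.ofList_append, String.ofList_toList]

theorem strJoinE_nil : PySem.Str.join "" [] = "" := by decide

theorem strJoinE_append_singleton (l : List String) (a : String) :
    PySem.Str.join "" (l ++ [a]) = PySem.Str.join "" l ++ a := by
  induction l with
  | nil => rw [List.nil_append, strJoinE_cons, strJoinE_nil, String.append_empty]; simp
  | cons b t ih =>
    rw [List.cons_append, strJoinE_cons, strJoinE_cons, ih, String.append_assoc]

theorem strJoinE_cons_append (a x : String) (l : List String) :
    PySem.Str.join "" (a :: (l ++ [x])) = PySem.Str.join "" (a :: l) ++ x := by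
  rw [strJoinE_cons, strJoinE_cons, strJoinE_append_singleton, String.append_assoc]

-- appending a non-'commit' line to a block appends its row to the block's body
theorem blockbody_nil : blockbody [] = "" := by
  simp only [blockbody, List.map_nil]
  exact strJoinE_nil

theorem blockbody_append (cur : List String) (ln : String)
    (h : PySem.Str.startswith ln "commit" = false) :
    blockbody (cur ++ [ln]) = blockbody cur ++ fmtline ln := by
  cases cur with
  | nil =>
    simp only [List.nil_append, blockbody, List.map_cons, List.map_nil]
    rw [if_neg (by rw [h]; decide), strJoinE_cons, strJoinE_nil, String.append_empty]
    simp
  | cons b0 rest =>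
    show blockbody (b0 :: (rest ++ [ln])) = _
    simp only [blockbody, List.map_cons, List.map_append, List.map_nil]
    split_ifs with hb
    · exact strJoinE_cons_append _ _ _
    · exact strJoinE_cons_append _ _ _

theorem blockbody_commit (ln : String) (h : PySem.Str.startswith ln "commit" = true) :
    blockbody [ln] = commitRow ln := by
  simp only [blockbody, List.map_nil]
  rw [if_pos h, strJoinE_cons, strJoinE_nil, String.append_empty]
  rfl

-- B's partition loop equals splitRec
theorem splitLoop_eq (lol : List String) : ∀ (bs : List (List String)) (cur : List String),
    (lol.foldl altSplitStep (bs, cur)).1 ++ [(lol.foldl altSplitStep (bs, cur)).2]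
      = bs ++ splitRec cur lol := by
  induction lol with
  | nil => intro bs cur; simp [splitRec]
  | cons ln rest ih =>
    intro bs cur
    by_cases hc : PySem.Str.startswith ln "commit" = true
    · simp only [List.foldl_cons, altSplitStep, splitRec]
      rw [if_pos hc, if_pos hc, ih]
      simp
    · simp only [List.foldl_cons, altSplitStep, splitRec]
      rw [if_neg hc, if_neg hc, ih]

-- the nonempty bodies of the blocks equal `bodies`
theorem blocksBodies_eq (lol : List String) : ∀ (cur : List String),
    ((splitRec cur lol).map blockbody).filter (fun b => b ≠ "")
      = bodies (blockbody cur) lol := by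
  induction lol with
  | nil =>
    intro cur
    simp only [splitRec, bodies, List.map_cons, List.map_nil, List.filter]
    by_cases h : blockbody cur = ""
    · rw [if_pos h]; simp [h]
    · rw [if_neg h]; simp [h]
  | cons ln rest ih =>
    intro cur
    by_cases hc : PySem.Str.startswith ln "commit" = true
    · simp only [splitRec, bodies]
      rw [if_pos hc, if_pos hc]
      simp only [List.map_cons, List.filter_cons]
      rw [ih, blockbody_commit ln hc]
      by_cases h : blockbody cur = ""
      · rw [if_pos h]; simp [h]
      · rw [if_neg h]; simp [h]
    · simp only [splitRec, bodies]
      rw [if_neg hc, if_neg hc, ih, blockbody_append cur ln (by simpa using hc)]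

-- B's endtable/EOF postprocessing equals emit
theorem emit_eq (bs : List String) :
    (if bs.map (fun b => b ++ endtable) = [] then []
     else (bs.map (fun b => b ++ endtable)).dropLast
          ++ [(bs.map (fun b => b ++ endtable)).getLast?.getD "" ++ "% EOF\n"])
      = emit bs := by
  induction bs with
  | nil => rfl
  | cons b t ih =>
    cases t with
    | nil => simp [emit, String.append_assoc]
    | cons c u =>
      rw [emit_cons _ _ (by simp)]
      simp only [List.map_cons] at ih ⊢
      rw [if_neg (by simp)] at ih
      rw [if_neg (by simp), List.dropLast_cons_of_ne_nil (by simp),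
        List.getLast?_cons_cons, List.cons_append, ← ih]

theorem genrecords_alt_eq (lol : List String) : genrecords_alt lol = emit (bodies "" lol) := by
  have h1 := splitLoop_eq lol [] []
  rw [List.nil_append] at h1
  simp only [genrecords_alt]
  rw [h1, blocksBodies_eq lol [], blockbody_nil]
  exact emit_eq _

-- ===== VERDICT (by name: the statement is the Claim_ definition above) =====
theorem genrecords_spec : Claim_equal_genrecords := by
  intro lol _ _
  show genrecords lol = genrecords_alt lol
  rw [genrecords_alt_eq]
  have := loopA_eq lol "" []
  simpa [genrecords] using this
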